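-- pv_equiv track=rewrite | github.com/AlgoMathITMO/public-transport-network | ptn/osm.py | is_shop
-- ===== SOURCE A (Python) =====
-- from typing import List, Tuple
--
-- def is_any_pair_present(tags: dict, items: List[Tuple[str, str]]) -> bool:
--     return isinstance(tags, dict) \
--            and any((key, value) in items for key, value in tags.items())
--
-- def is_shop(tags: dict) -> bool:
--     items = [
--         ('landuse', 'retail'),
--     ]
--     items += [('shop', val) for val in ['alcohol', 'antiques', 'appliance', 'art', 'bag',
--                                         'baker_supply', 'beauty', 'bicycle', 'binding', 'boat',
--                                         'baby_goods', 'charity', 'chemist', 'clock', 'clothes',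
--                                         'coffee', 'collector', 'consignment', 'computer', 'convenience',
--                                         'cosmetics', 'curtain', 'dairy', 'deli', 'department_store',
--                                         'doityourself', 'electronics', 'energy', 'equipment', 'erotic', 'esoteric',
--                                         'fabric', 'family', 'farm', 'fireplace', 'fireworks',
--                                         'florist', 'food', 'funeral_directors', 'furniture',
--                                         'games', 'garden_centre', 'gas', 'gift', 'greengrocer',
--                                         'hardware', 'hearing_aids', 'houseware', 'internet-shop',
--                                         'jewelry', 'kids', 'kiosk', 'knife', 'lighting',
--                                         'locksmith', 'lottery', 'meat', 'military_shop', 'mobile_phone', 'music',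
--                                         'numismatics', 'outdoor', 'paint', 'party', 'pet', 'photo',
--                                         'plants', 'plastic', 'pyrotechnics', 'second_hand',
--                                         'security', 'shoes', 'shop', 'smoke', 'storage_rental',
--                                         'supply', 'tools', 'toys', 'vacant', 'variety_store',
--                                         'video', 'wallpaper', 'watch']]
--
--     return is_any_pair_present(tags, items)
-- ===== SOURCE B (Python) =====
-- _SHOP_VALUES = [w for chunk in (
--     'alcohol antiques appliance art bag baker_supply beauty',
--     'bicycle binding boat baby_goods charity chemist clock',
--     'clothes coffee collector consignment computer convenience',
--     'cosmetics curtain dairy deli department_store doityourself',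
--     'electronics energy equipment erotic esoteric fabric family',
--     'farm fireplace fireworks florist food funeral_directors',
--     'furniture games garden_centre gas gift greengrocer hardware',
--     'hearing_aids houseware internet-shop jewelry kids kiosk',
--     'knife lighting locksmith lottery meat military_shop',
--     'mobile_phone music numismatics outdoor paint party pet photo',
--     'plants plastic pyrotechnics second_hand security shoes shop',
--     'smoke storage_rental supply tools toys vacant variety_store',
--     'video wallpaper watch'
-- ) for w in chunk.split()]
--
--
-- def is_shop(tags: dict) -> bool:
--     if not isinstance(tags, dict):
--         return False
--     if tags.get('landuse') == 'retail':
--         return True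
--     return tags.get('shop') in _SHOP_VALUES
-- ===== Notes on version B (the rewrite author's own statement) =====
-- stated objective: faster
-- what changed: Instead of building an 84-pair list and scanning every tag against it, B looks up the two relevant keys directly (tags.get('landuse') == 'retail', else tags.get('shop') in a fixed list of the 83 shop values), so tags.items() is never iterated.
import Mathlib
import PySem

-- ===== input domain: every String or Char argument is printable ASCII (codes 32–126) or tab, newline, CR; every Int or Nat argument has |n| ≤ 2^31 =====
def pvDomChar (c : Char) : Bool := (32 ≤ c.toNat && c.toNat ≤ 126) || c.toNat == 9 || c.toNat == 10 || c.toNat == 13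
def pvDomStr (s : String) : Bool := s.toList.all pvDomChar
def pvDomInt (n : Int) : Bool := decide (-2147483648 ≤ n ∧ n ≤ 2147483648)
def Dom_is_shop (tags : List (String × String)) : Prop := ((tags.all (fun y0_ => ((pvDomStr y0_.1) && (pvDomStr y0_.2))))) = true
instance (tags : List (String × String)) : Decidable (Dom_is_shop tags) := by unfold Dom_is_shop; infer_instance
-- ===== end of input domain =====

-- B replaces A's scan of every tag against an 84-pair list by two direct key lookups
-- ('landuse' == 'retail', else 'shop' value in a fixed value list): faster (measured), return value only.

-- ===== PORT A =====
-- the 83 shop values of A's list comprehension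
def shopVals : List String := ["alcohol", "antiques", "appliance", "art", "bag", "baker_supply", "beauty", "bicycle", "binding", "boat", "baby_goods", "charity", "chemist", "clock", "clothes", "coffee", "collector", "consignment", "computer", "convenience", "cosmetics", "curtain", "dairy", "deli", "department_store", "doityourself", "electronics", "energy", "equipment", "erotic", "esoteric", "fabric", "family", "farm", "fireplace", "fireworks", "florist", "food", "funeral_directors", "furniture", "games", "garden_centre", "gas", "gift", "greengrocer", "hardware", "hearing_aids", "houseware", "internet-shop", "jewelry", "kids", "kiosk", "knife", "lighting", "locksmith", "lottery", "meat", "military_shop", "mobile_phone", "music", "numismatics", "outdoor", "paint", "party", "pet", "photo", "plants", "plastic", "pyrotechnics", "second_hand", "security", "shoes", "shop", "smoke", "storage_rental", "supply", "tools", "toys", "vacant", "variety_store", "video", "wallpaper", "watch"]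

def is_any_pair_present (tags : PySem.Dict String String) (items : List (String × String)) : Bool :=
  tags.items.any (fun kv => items.contains kv)

def is_shop (tags : List (String × String)) : Bool :=
  let items : List (String × String) := [("landuse", "retail")]
  let items := items ++ shopVals.map (fun v => ("shop", v))
  is_any_pair_present (PySem.Dict.ofList tags) items

-- ===== PORT B =====
-- B's module-level constant: whitespace-split chunks flattened (Source B's comprehension over chunk.split())
def shopChunks : List String := ["alcohol antiques appliance art bag baker_supply beauty", "bicycle binding boat baby_goods charity chemist clock", "clothes coffee collector consignment computer convenience", "cosmetics curtain dairy deli department_store doityourself", "electronics energy equipment erotic esoteric fabric family", "farm fireplace fireworks florist food funeral_directors", "furniture games garden_centre gas gift greengrocer hardware", "hearing_aids houseware internet-shop jewelry kids kiosk", "knife lighting locksmith lottery meat military_shop", "mobile_phone music numismatics outdoor paint party pet photo", "plants plastic pyrotechnics second_hand security shoes shop", "smoke storage_rental supply tools toys vacant variety_store", "video wallpaper watch"]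
def shopValuesAlt : List String := shopChunks.flatMap PySem.Str.split₀

def is_shop_alt (tags : List (String × String)) : Bool :=
  let d := PySem.Dict.ofList tags
  if d.get? "landuse" == some "retail" then true
  else match d.get? "shop" with
       | some v => shopValuesAlt.contains v
       | none => false

-- ===== PRECONDITION & SPEC =====
def Spec_is_shop (tags : List (String × String)) (out : Bool) : Prop := out = is_shop_alt tags
instance (tags : List (String × String)) (out : Bool) : Decidable (Spec_is_shop tags out) := by unfold Spec_is_shop; infer_instance

-- ===== CLAIM (what is proved, stated in full; the proofs are below) =====
def Claim_equal_is_shop : Prop := ∀ (tags : List (String × String)), Dom_is_shop tags → Spec_is_shop tags (is_shop tags)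

-- ===== LEMMAS AND PROOFS =====
set_option maxRecDepth 4000 in
theorem shopValuesAlt_eq : shopValuesAlt = shopVals := by rfl

theorem pair_mem_items (k v : String) :
    ((k, v) ∈ ([("landuse", "retail")] ++ shopVals.map (fun v => ("shop", v))))
      ↔ (k = "landuse" ∧ v = "retail") ∨ (k = "shop" ∧ v ∈ shopVals) := by
  simp [List.mem_map, Prod.ext_iff, eq_comm, and_comm]

-- ===== VERDICT (by name: the statement is the Claim_ definition above) =====
theorem is_shop_spec : Claim_equal_is_shop := by
  intro tags _
  unfold Spec_is_shop is_shop is_shop_alt is_any_pair_present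
  rw [shopValuesAlt_eq]
  set d := PySem.Dict.ofList tags with hd
  have hnd : d.keys.Nodup := PySem.Dict.nodup_keys_ofList tags
  rw [Bool.eq_iff_iff]
  simp only [List.any_eq_true, List.contains_iff_mem]
  constructor
  · rintro ⟨⟨k, v⟩, hmem, hitems⟩
    rcases (pair_mem_items k v).mp hitems with ⟨rfl, rfl⟩ | ⟨rfl, hv⟩
    · simp [PySem.Dict.get?_of_mem_items d hmem hnd]
    · rw [PySem.Dict.get?_of_mem_items d hmem hnd]
      by_cases hl : d.get? "landuse" = some "retail" <;> simp [hl, hv]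
  · intro h
    split_ifs at h with hl
    · simp only [beq_iff_eq] at hl
      exact ⟨("landuse", "retail"), PySem.Dict.mem_items_of_get?_eq_some d hl,
        (pair_mem_items _ _).mpr (Or.inl ⟨rfl, rfl⟩)⟩
    · cases hs : d.get? "shop" with
      | none => rw [hs] at h; exact absurd h (by simp)
      | some v =>
        rw [hs] at h
        exact ⟨("shop", v), PySem.Dict.mem_items_of_get?_eq_some d hs,
          (pair_mem_items _ _).mpr (Or.inr ⟨rfl, by simpa using h⟩)⟩
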